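-- pv_equiv track=rewrite | github.com/andr1972/chesserazade | tools/blunder_hunt.py | deepest_rank
-- ===== SOURCE A (Python) =====
-- def deepest_rank(observations: list[tuple[int, int, str]],
--                  move_uci: str) -> tuple[int, int]:
--     """Return (deepest_depth_observed, rank_at_that_depth) for `move_uci`.
--     Returns (0, 0) when the move never appeared in any iteration's
--     top-K MultiPV. When a move appeared at multiple depths, takes the
--     deepest. Within the deepest iteration, takes the smallest rank
--     (best ranking)."""
--     by_depth: dict[int, int] = {}  # depth -> best (smallest) rank seen
--     for depth, rank, mv in observations:
--         if mv != move_uci: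
--             continue
--         prev = by_depth.get(depth)
--         if prev is None or rank < prev:
--             by_depth[depth] = rank
--     if not by_depth:
--         return (0, 0)
--     deepest = max(by_depth)
--     return (deepest, by_depth[deepest])
-- ===== SOURCE B (Python) =====
-- def deepest_rank(observations: list[tuple[int, int, str]],
--                  move_uci: str) -> tuple[int, int]:
--     """Single streaming pass: keep the best (deepest depth, smallest rank
--     at that depth) seen so far; no intermediate dict, no second max pass."""
--     best = None  # (best_depth, best_rank) or None
--     for depth, rank, mv in observations:
--         if mv == move_uci:
--             if best is None:
--                 best = (depth, rank)
--             else: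
--                 bd, br = best
--                 if bd < depth:
--                     best = (depth, rank)
--                 elif depth == bd and rank < br:
--                     best = (depth, rank)
--     return best if best is not None else (0, 0)
-- ===== Notes on version B (the rewrite author's own statement) =====
-- stated objective: simpler
-- what changed: Replaces the dict-of-best-ranks plus a second max()/lookup pass by a single streaming pass keeping one running (deepest depth, best rank) pair.
import Mathlib
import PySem

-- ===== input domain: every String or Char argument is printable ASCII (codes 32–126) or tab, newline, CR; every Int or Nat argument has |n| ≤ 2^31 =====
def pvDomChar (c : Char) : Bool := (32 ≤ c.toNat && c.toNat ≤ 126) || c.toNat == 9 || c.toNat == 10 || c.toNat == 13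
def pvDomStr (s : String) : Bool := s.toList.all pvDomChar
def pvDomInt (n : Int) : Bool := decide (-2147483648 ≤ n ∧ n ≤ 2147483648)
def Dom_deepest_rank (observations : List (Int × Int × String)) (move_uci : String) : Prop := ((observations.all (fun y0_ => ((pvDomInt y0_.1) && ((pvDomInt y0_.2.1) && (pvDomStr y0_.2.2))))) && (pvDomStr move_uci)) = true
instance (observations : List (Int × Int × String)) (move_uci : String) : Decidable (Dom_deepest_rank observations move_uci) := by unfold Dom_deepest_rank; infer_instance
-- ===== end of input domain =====

-- B replaces A's dict + second max()/lookup pass by ONE streaming pass keeping a running (deepest depth, best rank) pair (objective: simpler).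

-- ===== PORT A =====
-- loop body of A: update by_depth for one observation
def drStepA (move_uci : String) (d : PySem.Dict Int Int) (obs : Int × Int × String) : PySem.Dict Int Int :=
  if obs.2.2 ≠ move_uci then d
  else
    match d.get? obs.1 with
    | none => d.insert obs.1 obs.2.1
    | some prev => if obs.2.1 < prev then d.insert obs.1 obs.2.1 else d

-- A's tail: empty check, max over keys, lookup (the `none` arm is unreachable: Python's max sees a nonempty dict)
def drFinA (d : PySem.Dict Int Int) : Int × Int :=
  if d.items = [] then (0, 0)
  else
    match PySem.List.max? d.keys (fun x => x) with
    | some deepest => (deepest, d.getD deepest 0)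
    | none => (0, 0)

def deepest_rank (observations : List (Int × Int × String)) (move_uci : String) : Int × Int :=
  drFinA (observations.foldl (drStepA move_uci) PySem.Dict.empty)

-- ===== PORT B =====
-- loop body of B: update the running best (depth, rank) pair for one observation
def drStepB (move_uci : String) (b : Option (Int × Int)) (obs : Int × Int × String) : Option (Int × Int) :=
  if obs.2.2 = move_uci then
    match b with
    | none => some (obs.1, obs.2.1)
    | some (bd, br) =>
      if bd < obs.1 then some (obs.1, obs.2.1)
      else if obs.1 = bd ∧ obs.2.1 < br then some (obs.1, obs.2.1)
      else some (bd, br)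
  else b

def deepest_rank_alt (observations : List (Int × Int × String)) (move_uci : String) : Int × Int :=
  (observations.foldl (drStepB move_uci) none).getD (0, 0)

-- ===== PRECONDITION & SPEC =====
def Spec_deepest_rank (observations : List (Int × Int × String)) (move_uci : String) (out : Int × Int) : Prop := out = deepest_rank_alt observations move_uci
instance (observations : List (Int × Int × String)) (move_uci : String) (out : Int × Int) : Decidable (Spec_deepest_rank observations move_uci out) := by unfold Spec_deepest_rank; infer_instance

-- ===== CLAIM (what is proved, stated in full; the proofs are below) =====
def Claim_equal_deepest_rank : Prop := ∀ (observations : List (Int × Int × String)) (move_uci : String), Dom_deepest_rank observations move_uci → Spec_deepest_rank observations move_uci (deepest_rank observations move_uci)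

-- ===== LEMMAS AND PROOFS =====

-- invariant tying A's dict to B's running pair
def drInv (d : PySem.Dict Int Int) (b : Option (Int × Int)) : Prop :=
  d.keys.Nodup ∧
  match b with
  | none => d.items = []
  | some (bd, br) => d.get? bd = some br ∧ ∀ k ∈ d.keys, k ≤ bd

lemma drInv_empty : drInv PySem.Dict.empty none := by
  constructor
  · exact PySem.Dict.nodup_keys_empty
  · rfl

lemma drInv_step (mv : String) (d : PySem.Dict Int Int) (b : Option (Int × Int))
    (o : Int × Int × String) (h : drInv d b) : drInv (drStepA mv d o) (drStepB mv b o) := by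
  obtain ⟨hnd, hb⟩ := h
  obtain ⟨depth, rank, s⟩ := o
  by_cases hs : s = mv
  · simp only [drStepA, drStepB, hs]
    simp only [ne_eq, not_true_eq_false, if_false, if_true]
    match b with
    | none =>
      -- d.items = [] so d is the empty dict
      have hd : d = PySem.Dict.empty := PySem.Dict.ext (by simpa using hb)
      subst hd
      have : (PySem.Dict.empty : PySem.Dict Int Int).get? depth = none :=
        PySem.Dict.get?_empty depth
      simp only [this]
      refine ⟨?_, ?_, ?_⟩
      · exact PySem.Dict.nodup_keys_insert _ _ _ PySem.Dict.nodup_keys_empty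
      · exact PySem.Dict.get?_insert_self _ _ _
      · intro k hk
        rcases (PySem.Dict.mem_keys_insert _ _ _ _).1 hk with h1 | h1
        · omega
        · simp [PySem.Dict.keys_empty] at h1
    | some (bd, br) =>
      obtain ⟨hget, hmax⟩ := hb
      have hbdmem : bd ∈ d.keys :=
        PySem.Dict.mem_keys_of_mem_items d (PySem.Dict.mem_items_of_get?_eq_some d hget)
      by_cases hlt : bd < depth
      · -- depth is a fresh key, new maximum
        have hnm : depth ∉ d.keys := fun hm => absurd (hmax depth hm) (by omega)
        have hget2 : d.get? depth = none :=
          (PySem.Dict.get?_eq_none_iff_not_mem_keys d depth).2 hnm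
        simp only [hget2, hlt, if_true]
        refine ⟨PySem.Dict.nodup_keys_insert _ _ _ hnd, PySem.Dict.get?_insert_self _ _ _, ?_⟩
        intro k hk
        rcases (PySem.Dict.mem_keys_insert _ _ _ _).1 hk with h1 | h1
        · omega
        · have := hmax k h1; omega
      · simp only [hlt, if_false]
        by_cases heq : depth = bd
        · -- same depth as current best: A replaces iff rank < br, so does B
          subst heq
          simp only [hget]
          by_cases hr : rank < br
          · simp only [hr, if_true, and_true, if_pos rfl]
            refine ⟨?_, PySem.Dict.get?_insert_self _ _ _, ?_⟩
            · exact PySem.Dict.nodup_keys_insert _ _ _ hnd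
            · intro k hk
              rcases (PySem.Dict.mem_keys_insert _ _ _ _).1 hk with h1 | h1
              · omega
              · exact hmax k h1
          · simp only [hr, if_false, and_false, if_false]
            exact ⟨hnd, hget, hmax⟩
        · -- strictly smaller depth: A may update a smaller key, best pair unchanged
          have hif : (if depth = bd ∧ rank < br then some (depth, rank) else some (bd, br))
              = some (bd, br) := by simp [heq]
          rw [hif]
          have hne : bd ≠ depth := fun h => heq h.symm
          have hkeys : ∀ k ∈ (d.insert depth rank).keys, k ≤ bd := by
            intro k hk
            rcases (PySem.Dict.mem_keys_insert _ _ _ _).1 hk with h1 | h1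
            · subst h1; omega
            · exact hmax k h1
          match hg : d.get? depth with
          | none =>
            exact ⟨PySem.Dict.nodup_keys_insert _ _ _ hnd,
              (PySem.Dict.get?_insert_of_ne d _ hne).trans hget, hkeys⟩
          | some prev =>
            by_cases hr : rank < prev
            · simp only [hr, if_true]
              exact ⟨PySem.Dict.nodup_keys_insert _ _ _ hnd,
                (PySem.Dict.get?_insert_of_ne d _ hne).trans hget, hkeys⟩
            · simp only [hr, if_false]
              exact ⟨hnd, hget, hmax⟩
  · simp only [drStepA, drStepB, hs]
    simpa [hs] using ⟨hnd, hb⟩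

lemma drFin_eq (d : PySem.Dict Int Int) (b : Option (Int × Int)) (h : drInv d b) :
    drFinA d = b.getD (0, 0) := by
  obtain ⟨hnd, hb⟩ := h
  match b with
  | none => simp [drFinA, hb]
  | some (bd, br) =>
    obtain ⟨hget, hmax⟩ := hb
    have hbdmem : bd ∈ d.keys :=
      PySem.Dict.mem_keys_of_mem_items d (PySem.Dict.mem_items_of_get?_eq_some d hget)
    have hne : d.items ≠ [] := by
      intro hcon
      have : d.keys = [] := by simp [PySem.Dict.keys, hcon]
      simp [this] at hbdmem
    have hkne : d.keys ≠ [] := List.ne_nil_of_mem hbdmem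
    match hm : PySem.List.max? d.keys (fun x => x) with
    | none => exact absurd ((PySem.List.max?_eq_none_iff _ _).1 hm) hkne
    | some m =>
      have hmmem : m ∈ d.keys := PySem.List.max?_mem hm
      have h1 : m ≤ bd := hmax m hmmem
      have h2 : bd ≤ m := PySem.List.max?_isMax hm bd hbdmem
      have hmbd : m = bd := le_antisymm h1 h2
      subst hmbd
      simp [drFinA, hne, hm, PySem.Dict.getD_of_get?_eq_some d _ hget]

lemma drLoop (mv : String) (l : List (Int × Int × String)) :
    ∀ (d : PySem.Dict Int Int) (b : Option (Int × Int)), drInv d b →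
      drFinA (l.foldl (drStepA mv) d) = (l.foldl (drStepB mv) b).getD (0, 0) := by
  induction l with
  | nil => intro d b h; exact drFin_eq d b h
  | cons o t ih =>
    intro d b h
    simp only [List.foldl_cons]
    exact ih _ _ (drInv_step mv d b o h)

-- ===== VERDICT (by name: the statement is the Claim_ definition above) =====
theorem deepest_rank_spec : Claim_equal_deepest_rank := by
  intro observations move_uci _
  show deepest_rank observations move_uci = deepest_rank_alt observations move_uci
  exact drLoop move_uci observations PySem.Dict.empty none drInv_empty
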